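-- pv_equiv track=rewrite | github.com/daniel-reich/ubiquitous-fiesta | QcswPnY2cAbrfwuWE_16.py | filter_factorials
-- ===== SOURCE A (Python) =====
-- def filter_factorials(numbers):
--   biggest, fact, i = max(numbers), 1, 1
--   factorials = []
--   while fact <= biggest:
--     factorials.append(fact)
--     fact *= i
--     i += 1
--   return [num for num in numbers if num in factorials]
-- ===== SOURCE B (Python) =====
-- def filter_factorials(numbers):
--     def is_factorial(n):
--         if n < 1:
--             return False
--         d = 1
--         while n > 1:
--             d += 1
--             if n % d != 0:
--                 return False
--             n //= d
--         return True
--     return [num for num in numbers if is_factorial(num)]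
-- ===== Notes on version B (the rewrite author's own statement) =====
-- stated objective: alternative
-- what changed: B tests each number directly by trial division (divide by 2,3,4,... and check divisibility) instead of precomputing a table of all factorials up to max(numbers) and doing list-membership scans.
-- crash fix: A raises ValueError (max of empty sequence) on the empty list, where B returns []. — e.g. on filter_factorials([]): A raises ValueError, B returns []
import Mathlib
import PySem

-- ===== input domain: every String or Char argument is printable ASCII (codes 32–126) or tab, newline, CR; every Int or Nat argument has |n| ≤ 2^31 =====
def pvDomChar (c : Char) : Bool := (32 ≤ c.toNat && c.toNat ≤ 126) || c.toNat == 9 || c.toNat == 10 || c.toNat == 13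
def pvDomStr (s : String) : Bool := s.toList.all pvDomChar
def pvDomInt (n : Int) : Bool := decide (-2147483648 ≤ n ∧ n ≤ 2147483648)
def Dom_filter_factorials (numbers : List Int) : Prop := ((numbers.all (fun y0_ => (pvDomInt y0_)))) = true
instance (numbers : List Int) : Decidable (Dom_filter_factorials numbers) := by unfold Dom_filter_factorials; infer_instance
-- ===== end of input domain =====

-- B replaces A's precomputed table of all factorials up to max(numbers) (plus a membership
-- scan per element) by a direct per-element trial-division test (divide by 2,3,4,…).

-- ===== PORT A =====
-- A's while loop building `factorials`; fuel only makes the recursion total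
-- (biggest.toNat + 2 iterations always suffice, proved in the lemmas below).
def buildFactsGo (biggest : Int) : Nat → Int → Int → List Int → List Int
  | 0, _, _, acc => acc
  | fuel+1, fact, i, acc =>
    if fact ≤ biggest then buildFactsGo biggest fuel (fact * i) (i + 1) (acc ++ [fact])
    else acc

def filter_factorials (numbers : List Int) : List Int :=
  match PySem.List.max? numbers (fun x => x) with
  | none => []   -- max([]) raises ValueError in Python; excluded by Pre_
  | some biggest =>
    let factorials := buildFactsGo biggest (biggest.toNat + 2) 1 1 []
    numbers.filter (fun num => decide (num ∈ factorials))

-- ===== PORT B =====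
-- B's `while n > 1: d += 1; if n % d != 0: return False; n //= d` loop; fuel = n.toNat
-- only makes the recursion total (n strictly decreases each iteration).
def isFactLoop : Nat → Int → Int → Bool
  | 0, _, _ => true
  | fuel+1, n, d =>
    if 1 < n then
      if PySem.Int.mod n (d + 1) ≠ 0 then false
      else isFactLoop fuel (PySem.Int.floordiv n (d + 1)) (d + 1)
    else true

def is_factorial (n : Int) : Bool :=
  if n < 1 then false else isFactLoop n.toNat n 1

def filter_factorials_alt (numbers : List Int) : List Int :=
  numbers.filter is_factorial

-- ===== PRECONDITION & SPEC =====
-- Pre_ excludes only the empty list, on which Python A raises ValueError (max of empty sequence).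
def Pre_filter_factorials (numbers : List Int) : Prop := numbers ≠ []
instance (numbers : List Int) : Decidable (Pre_filter_factorials numbers) := by
  unfold Pre_filter_factorials; infer_instance

def pvWitness_filter_factorials : List Int := [1, 5, 6, 24, 0, -3, 720]

-- A raises ValueError on the empty list; B returns [] there.
def Raises_filter_factorials (numbers : List Int) : Prop := numbers = []
instance (numbers : List Int) : Decidable (Raises_filter_factorials numbers) := by
  unfold Raises_filter_factorials; infer_instance
def pvRaiseWitness_filter_factorials : List Int := []
def pvRaiseWitnessOut_filter_factorials : List Int := []

def Spec_filter_factorials (numbers : List Int) (out : List Int) : Prop := out = filter_factorials_alt numbers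
instance (numbers : List Int) (out : List Int) : Decidable (Spec_filter_factorials numbers out) := by unfold Spec_filter_factorials; infer_instance

-- ===== CLAIM (what is proved, stated in full; the proofs are below) =====
def Claim_equal_filter_factorials : Prop := ∀ (numbers : List Int), Dom_filter_factorials numbers → Pre_filter_factorials numbers → Spec_filter_factorials numbers (filter_factorials numbers)

def Claim_raises_filter_factorials : Prop := (∀ (numbers : List Int), Dom_filter_factorials numbers → Raises_filter_factorials numbers → ¬ Pre_filter_factorials numbers) ∧ (Dom_filter_factorials (pvRaiseWitness_filter_factorials) ∧ Raises_filter_factorials (pvRaiseWitness_filter_factorials) ∧ filter_factorials_alt (pvRaiseWitness_filter_factorials) = pvRaiseWitnessOut_filter_factorials)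

-- ===== LEMMAS AND PROOFS =====

-- the mathematical factorial, as an Int
def F (k : Nat) : Int := (Nat.factorial k : Int)

lemma F_pos (k : Nat) : 0 < F k := by
  unfold F; exact_mod_cast Nat.factorial_pos k

lemma F_mono {j k : Nat} (h : j ≤ k) : F j ≤ F k := by
  unfold F; exact_mod_cast Nat.factorial_le h

lemma F_succ (k : Nat) : F (k + 1) = F k * ((k : Int) + 1) := by
  unfold F; push_cast [Nat.factorial_succ]; ring

-- membership in the list built by A's loop
lemma buildFactsGo_mem (biggest : Int) :
    ∀ (fuel : Nat) (k : Nat) (acc : List Int),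
      (∃ j < fuel, biggest < F (k + j)) →
      ∀ n : Int,
        (n ∈ buildFactsGo biggest fuel (F k) ((k : Int) + 1) acc ↔
          n ∈ acc ∨ ∃ m, k ≤ m ∧ n = F m ∧ n ≤ biggest) := by
  intro fuel
  induction fuel with
  | zero => intro k acc h n; exact absurd h (by simp)
  | succ fuel ih =>
    intro k acc h n
    by_cases hle : F k ≤ biggest
    · have hrec : buildFactsGo biggest (fuel+1) (F k) ((k : Int) + 1) acc
          = buildFactsGo biggest fuel (F (k+1)) ((k+1 : Nat) + 1) (acc ++ [F k]) := by
        simp [buildFactsGo, hle, F_succ]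
      rw [hrec]
      obtain ⟨j, hj, hbig⟩ := h
      have hj0 : j ≠ 0 := by
        rintro rfl; simp at hbig; omega
      obtain ⟨j', rfl⟩ := Nat.exists_eq_succ_of_ne_zero hj0
      have h' : ∃ j < fuel, biggest < F (k + 1 + j) := by
        exact ⟨j', by omega, by have : k + 1 + j' = k + (j' + 1) := by omega
                                rw [this]; exact hbig⟩
      rw [ih (k+1) (acc ++ [F k]) h' n]
      constructor
      · rintro (hmem | ⟨m, hm, rfl, hnb⟩)
        · rcases List.mem_append.mp hmem with h1 | h1
          · exact Or.inl h1
          · simp at h1; exact Or.inr ⟨k, le_refl _, h1, h1 ▸ hle⟩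
        · exact Or.inr ⟨m, by omega, rfl, hnb⟩
      · rintro (hmem | ⟨m, hm, rfl, hnb⟩)
        · exact Or.inl (List.mem_append.mpr (Or.inl hmem))
        · rcases Nat.eq_or_lt_of_le hm with rfl | hlt
          · exact Or.inl (List.mem_append.mpr (Or.inr (by simp)))
          · exact Or.inr ⟨m, by omega, rfl, hnb⟩
    · have : buildFactsGo biggest (fuel+1) (F k) ((k : Int) + 1) acc = acc := by
        simp [buildFactsGo, hle]
      rw [this]
      constructor
      · exact Or.inl
      · rintro (hmem | ⟨m, hm, rfl, hnb⟩)
        · exact hmem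
        · exact absurd (lt_of_le_of_lt (le_trans (F_mono hm) hnb) (lt_of_not_ge hle))
            (lt_irrefl _)

-- A's factorial table contains exactly the factorials ≤ biggest
lemma facts_mem (biggest : Int) (n : Int) :
    n ∈ buildFactsGo biggest (biggest.toNat + 2) 1 1 [] ↔ ∃ m, n = F m ∧ n ≤ biggest := by
  have hfuel : ∃ j < biggest.toNat + 2, biggest < F (0 + j) := by
    refine ⟨biggest.toNat + 1, by omega, ?_⟩
    have h2 : (biggest.toNat + 1 : Nat) ≤ Nat.factorial (biggest.toNat + 1) :=
      Nat.self_le_factorial _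
    have h3 : biggest < ((biggest.toNat + 1 : Nat) : Int) := by
      have := Int.self_le_toNat biggest
      omega
    calc biggest < ((biggest.toNat + 1 : Nat) : Int) := h3
      _ ≤ F (biggest.toNat + 1) := by unfold F; exact_mod_cast h2
      _ = F (0 + (biggest.toNat + 1)) := by norm_num
  have h := buildFactsGo_mem biggest (biggest.toNat + 2) 0 [] hfuel n
  have e1 : F 0 = 1 := by simp [F, Nat.factorial]
  have e2 : ((0 : Nat) : Int) + 1 = 1 := by simp
  rw [e1, e2] at h
  simpa using h

-- B's trial-division loop: true iff the start value times d! is a factorial m! with m ≥ d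
lemma isFactLoop_iff :
    ∀ (fuel : Nat) (n : Int) (d : Nat), 1 ≤ n → n.toNat ≤ fuel → 1 ≤ d →
      (isFactLoop fuel n (d : Int) = true ↔ ∃ m, d ≤ m ∧ n * F d = F m) := by
  intro fuel
  induction fuel with
  | zero => intro n d hn hfuel _; omega
  | succ fuel ih =>
    intro n d hn hfuel hd
    by_cases hn1 : 1 < n
    · have hDpos : (0 : Int) < (d : Int) + 1 := by positivity
      by_cases hdvd : ((d : Int) + 1) ∣ n
      · -- divisibility holds: loop recurses on n / (d+1)
        have hdvd' := hdvd
        obtain ⟨q, hq⟩ := hdvd'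
        have hqpos : 1 ≤ q := by nlinarith
        have hdiv : n / ((d : Int) + 1) = q := by
          rw [hq, Int.mul_ediv_cancel_left _ (by omega : ((d : Int) + 1) ≠ 0)]
        have hstep : isFactLoop (fuel+1) n (d : Int) = isFactLoop fuel q ((d : Int) + 1) := by
          simp [isFactLoop, hn1, hdvd, hdiv]
        have hqlt : q < n := by nlinarith
        have hqfuel : q.toNat ≤ fuel := by omega
        have hcast : ((d : Int) + 1) = ((d + 1 : Nat) : Int) := by push_cast; ring
        rw [hstep, hcast, ih q (d+1) hqpos hqfuel (by omega)]
        constructor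
        · rintro ⟨m, hm, heq⟩
          refine ⟨m, by omega, ?_⟩
          rw [← heq, F_succ, hq]; push_cast; ring
        · rintro ⟨m, hm, heq⟩
          have hmd : d ≠ m := by
            rintro rfl
            have := F_pos d
            nlinarith
          refine ⟨m, by omega, ?_⟩
          rw [F_succ]
          have : n * F d = q * (F d * ((d : Int) + 1)) := by rw [hq]; ring
          rw [← this, heq]
      · -- divisibility fails: loop returns false, and n * d! is no factorial
        have hstep : isFactLoop (fuel+1) n (d : Int) = false := by
          simp [isFactLoop, hn1]
          exact fun hdv => absurd hdv hdvd
        rw [hstep]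
        simp only [Bool.false_eq_true, false_iff]
        rintro ⟨m, hm, heq⟩
        have hmd : d ≠ m := by
          rintro rfl
          have := F_pos d
          nlinarith
        have hsucc : d + 1 ≤ m := by omega
        have hdvdNat : Nat.factorial (d+1) ∣ Nat.factorial m :=
          Nat.factorial_dvd_factorial hsucc
        obtain ⟨t, ht⟩ := hdvdNat
        have htInt : F m = F (d+1) * (t : Int) := by
          unfold F; rw [ht]; push_cast; ring
        have : n * F d = F d * ((d : Int) + 1) * (t : Int) := by
          rw [heq, htInt, F_succ]
        have hn' : n = ((d : Int) + 1) * (t : Int) := by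
          have hFd := F_pos d
          have h2 : F d * n = F d * (((d : Int) + 1) * (t : Int)) := by linarith [this]
          exact mul_left_cancel₀ (ne_of_gt hFd) h2
        exact hdvd ⟨t, hn'⟩
    · -- n = 1: loop exits with true, and 1 * d! = d!
      have hn1' : n = 1 := by omega
      have hstep : isFactLoop (fuel+1) n (d : Int) = true := by
        simp [isFactLoop, hn1]
      rw [hstep]
      simp only [true_iff]
      exact ⟨d, le_refl _, by rw [hn1']; ring⟩

-- B's test characterises the factorials
lemma is_factorial_iff (n : Int) : is_factorial n = true ↔ ∃ m, n = F m := by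
  unfold is_factorial
  by_cases hlt : n < 1
  · simp only [hlt, if_true, Bool.false_eq_true, false_iff]
    rintro ⟨m, rfl⟩
    exact absurd hlt (not_lt.mpr (F_pos m))
  · have hn : 1 ≤ n := by omega
    have h1 : (1 : Int) = ((1 : Nat) : Int) := by simp
    rw [if_neg hlt, h1, isFactLoop_iff n.toNat n 1 hn (le_refl _) (le_refl _)]
    constructor
    · rintro ⟨m, _, heq⟩
      refine ⟨m, ?_⟩
      have : F 1 = 1 := by simp [F, Nat.factorial]
      rw [this, mul_one] at heq; exact heq
    · rintro ⟨m, rfl⟩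
      rcases Nat.eq_zero_or_pos m with rfl | hm
      · exact ⟨1, le_refl _, by simp [F, Nat.factorial]⟩
      · exact ⟨m, hm, by simp [F, Nat.factorial]⟩

-- ===== VERDICT (by name: the statement is the Claim_ definition above) =====
theorem filter_factorials_spec : Claim_equal_filter_factorials := by
  intro numbers _ hpre
  unfold Spec_filter_factorials filter_factorials filter_factorials_alt
  cases hmax : PySem.List.max? numbers (fun x => x) with
  | none => exact absurd ((PySem.List.max?_eq_none_iff numbers _).mp hmax) hpre
  | some biggest =>
    simp only
    apply List.filter_congr
    intro n hn
    have hnb : n ≤ biggest := PySem.List.max?_isMax hmax n hn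
    by_cases h : ∃ m, n = F m
    · obtain ⟨m, rfl⟩ := h
      rw [decide_eq_true ((facts_mem biggest (F m)).mpr ⟨m, rfl, hnb⟩),
        (is_factorial_iff (F m)).mpr ⟨m, rfl⟩]
    · have h1 : n ∉ buildFactsGo biggest (biggest.toNat + 2) 1 1 [] := by
        rw [facts_mem]; rintro ⟨m, hm, -⟩; exact h ⟨m, hm⟩
      have h2 : is_factorial n = false := by
        rw [← Bool.not_eq_true, is_factorial_iff]; exact h
      rw [decide_eq_false h1, h2]

theorem filter_factorials_raises : Claim_raises_filter_factorials := by
  unfold Claim_raises_filter_factorials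
  exact ⟨fun numbers _ h => by simpa [Pre_filter_factorials] using h, by decide⟩

-- witness self-check: B's port really returns [] at the raise witness (projection of the theorem above)
theorem filter_factorials_raises_witness :
    filter_factorials_alt pvRaiseWitness_filter_factorials = pvRaiseWitnessOut_filter_factorials :=
  filter_factorials_raises.2.2.2
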